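-- pv_equiv track=rewrite | github.com/olekhova-geekbrains/seminars-py | 03Homework/task5.py | fibonacci1
-- ===== SOURCE A (Python) =====
-- def fibonacci1(n):
--     fib = [0]*(2*n + 1)
--     if n == 0:
--         return fib
--     fib[n] = 0
--     fib[n+1] = 1
--     fib[n-1] = 1
--     for i in range(n - 1):
--         fib[n + i + 2] = fib[n + i + 1] + fib[n + i]
--         fib[n - i - 2] = (-1)**(i + 1)*fib[n + i + 2]
--     return fib
-- ===== SOURCE B (Python) =====
-- def fibonacci1(n):
--     a, b = 0, 1
--     pos = []
--     for _ in range(n + 1):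
--         pos.append(a)
--         a, b = b, a + b
--     neg = [pos[k] if k % 2 else -pos[k] for k in range(n, 0, -1)]
--     return neg + pos
-- ===== Notes on version B (the rewrite author's own statement) =====
-- stated objective: alternative
-- what changed: A preallocates a (2n+1)-cell array and fills both halves by index assignment in one interleaved loop stepping outward from the centre; B never indexes an output array: it builds the positive list [F(0)..F(n)] with a rolling (a,b) pair and append, derives the negative half as a reversed signed comprehension over that list (F(-k)=(-1)^(k+1)F(k)), and returns their concatenation.
-- outside the precondition, e.g. on fibonacci1(-1): A raises IndexError, B returns []
import Mathlib
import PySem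

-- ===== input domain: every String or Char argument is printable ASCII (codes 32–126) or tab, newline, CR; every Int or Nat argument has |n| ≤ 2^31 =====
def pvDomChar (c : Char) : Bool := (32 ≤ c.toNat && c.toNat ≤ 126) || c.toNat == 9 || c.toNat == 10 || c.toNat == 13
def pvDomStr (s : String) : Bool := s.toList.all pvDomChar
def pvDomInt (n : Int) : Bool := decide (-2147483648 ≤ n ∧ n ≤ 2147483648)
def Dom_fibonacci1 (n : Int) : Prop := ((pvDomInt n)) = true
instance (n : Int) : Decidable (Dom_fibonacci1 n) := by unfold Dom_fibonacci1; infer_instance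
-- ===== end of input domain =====

-- B replaces A's preallocated array filled by index assignment in one interleaved loop with a
-- rolling-pair build of the positive Fibonacci list, a reversed signed comprehension for the
-- negative half, and list concatenation (objective: alternative decomposition/data structure).

-- ===== PORT A =====
-- loop body of A: fib[n+i+2] = fib[n+i+1] + fib[n+i]; fib[n-i-2] = (-1)**(i+1)*fib[n+i+2]
-- indices are in range and the exponent i+1 is nonnegative on all admitted inputs, so
-- pySetD / pyGetD / .toNat are exact here
def stepA (n : Int) (fib : List Int) (i : Int) : List Int :=
  let fib := PySem.List.pySetD fib (n+i+2)
      (PySem.List.pyGetD fib (n+i+1) 0 + PySem.List.pyGetD fib (n+i) 0)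
  PySem.List.pySetD fib (n-i-2) ((-1 : Int)^(i+1).toNat * PySem.List.pyGetD fib (n+i+2) 0)

def fibonacci1 (n : Int) : List Int :=
  let fib := List.replicate (2*n+1).toNat 0
  if n = 0 then fib
  else
    let fib := PySem.List.pySetD fib n 0
    let fib := PySem.List.pySetD fib (n+1) 1
    let fib := PySem.List.pySetD fib (n-1) 1
    (PySem.List.pyRange 0 (n-1) 1).foldl (stepA n) fib

-- ===== PORT B =====
-- loop of B: pos.append(a); a, b = b, a + b — state is (pos, a, b); the loop variable is unused
def stepB (s : List Int × Int × Int) (_ : Int) : List Int × Int × Int :=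
  (s.1 ++ [s.2.1], s.2.2, s.2.1 + s.2.2)

def fibonacci1_alt (n : Int) : List Int :=
  let st := (PySem.List.pyRange 0 (n+1) 1).foldl stepB ([], 0, 1)
  let pos := st.1
  -- [pos[k] if k % 2 else -pos[k] for k in range(n, 0, -1)]; k is in range, so pyGetD is exact
  let neg := (PySem.List.pyRange n 0 (-1)).map
      (fun k => if PySem.Int.mod k 2 ≠ 0 then PySem.List.pyGetD pos k 0
                else -(PySem.List.pyGetD pos k 0))
  neg ++ pos

-- ===== PRECONDITION & SPEC =====
-- Python A raises IndexError for every n < 0 (it indexes into the empty list); Pre_ excludes exactly those.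
def Pre_fibonacci1 (n : Int) : Prop := 0 ≤ n
instance (n : Int) : Decidable (Pre_fibonacci1 n) := by unfold Pre_fibonacci1; infer_instance
def pvWitness_fibonacci1 : Int := (3)

def Spec_fibonacci1 (n : Int) (out : List Int) : Prop := out = fibonacci1_alt n
instance (n : Int) (out : List Int) : Decidable (Spec_fibonacci1 n out) := by unfold Spec_fibonacci1; infer_instance

-- ===== CLAIM (what is proved, stated in full; the proofs are below) =====
def Claim_equal_fibonacci1 : Prop := ∀ (n : Int), Dom_fibonacci1 n → Pre_fibonacci1 n → Spec_fibonacci1 n (fibonacci1 n)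

-- ===== LEMMAS AND PROOFS =====

-- the mathematical Fibonacci numbers
def pvF : Nat → Int
  | 0 => 0
  | 1 => 1
  | k+2 => pvF (k+1) + pvF k

-- the entry both programs leave at position j of the array of length 2m+1
def pvEnt (m j : Nat) : Int :=
  if m ≤ j then pvF (j - m) else (-1 : Int)^(m - j + 1) * pvF (m - j)

-- partial state: positions lo..hi carry their final entry, everything else still 0
def pvWin (m lo hi : Nat) : List Int :=
  (List.range (2*m+1)).map (fun j => if lo ≤ j ∧ j ≤ hi then pvEnt m j else 0)

lemma get_map_range (N j : Nat) (f : Nat → Int) (h : j < N) :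
    PySem.List.pyGetD ((List.range N).map f) ((j : Nat) : Int) 0 = f j := by
  simp [PySem.List.pyGetD_natCast, List.getD_eq_getElem?_getD, h]

lemma set_map_range (N k : Nat) (f : Nat → Int) (v : Int) (_h : k < N) :
    PySem.List.pySetD ((List.range N).map f) ((k : Nat) : Int) v
      = (List.range N).map (fun j => if j = k then v else f j) := by
  rw [PySem.List.pySetD_natCast]
  apply List.ext_getElem
  · simp
  · intro i h1 h2
    simp only [List.getElem_set, List.getElem_map, List.getElem_range]
    rcases eq_or_ne k i with hik | hik
    · simp [hik]
    · simp [hik, Ne.symm hik]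

lemma map_range_congr (N : Nat) (f g : Nat → Int) (h : ∀ j < N, f j = g j) :
    (List.range N).map f = (List.range N).map g :=
  List.map_congr_left (by simpa using h)

lemma ent_ge (m k : Nat) : pvEnt m (m + k) = pvF k := by
  have h : m + k - m = k := by omega
  simp [pvEnt, h]

lemma ent_lt (m k : Nat) (h1 : 1 ≤ k) (h2 : k ≤ m) :
    pvEnt m (m - k) = (-1 : Int)^(k+1) * pvF k := by
  have hlt : ¬ m ≤ m - k := by omega
  have h3 : m - (m - k) = k := by omega
  simp [pvEnt, hlt, h3]

lemma get_win (m lo hi j : Nat) (hj : j < 2*m+1) (h1 : lo ≤ j) (h2 : j ≤ hi) :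
    PySem.List.pyGetD (pvWin m lo hi) ((j : Nat) : Int) 0 = pvEnt m j := by
  simp only [pvWin]; rw [get_map_range _ _ _ hj]; simp [h1, h2]

lemma stepA_win (m t : Nat) (h : t + 2 ≤ m) :
    stepA (m : Int) (pvWin m (m-t-1) (m+t+1)) ((t : Nat) : Int)
      = pvWin m (m-t-2) (m+t+2) := by
  have e1 : (((m+t : Nat)):Int) + 2 = (((m+t+2 : Nat)) : Int) := by push_cast; ring
  have e2 : (m:Int) + (t:Int) + 1 = (((m+t+1 : Nat)) : Int) := by push_cast; ring
  have e3 : (m:Int) + (t:Int) = (((m+t : Nat)) : Int) := by push_cast; ring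
  have e4 : (m:Int) - (t:Int) - 2 = (((m-t-2 : Nat)) : Int) := by omega
  have e5 : ((t:Int)+1).toNat = t + 1 := by omega
  have hva : pvEnt m (m+t+1) + pvEnt m (m+t) = pvEnt m (m+t+2) := by
    have a1 : m+t+1 = m+(t+1) := by omega
    have a2 : m+t+2 = m+(t+2) := by omega
    rw [a1, a2, ent_ge, ent_ge, ent_ge]; simp [pvF]
  have hvb : (-1:Int)^(t+1) * pvEnt m (m+t+2) = pvEnt m (m-t-2) := by
    have a2 : m+t+2 = m+(t+2) := by omega
    have a3 : m-t-2 = m-(t+2) := by omega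
    rw [a2, ent_ge, a3, ent_lt m (t+2) (by omega) h, pow_succ, pow_succ]; ring
  unfold stepA
  rw [e2, e3, get_win m _ _ (m+t+1) (by omega) (by omega) (by omega),
      get_win m _ _ (m+t) (by omega) (by omega) (by omega), hva]
  simp only [pvWin]
  rw [e1, set_map_range _ _ _ _ (by omega), e5,
      get_map_range _ (m+t+2) _ (by omega)]
  rw [if_pos rfl, hvb, e4, set_map_range _ _ _ _ (by omega)]
  apply map_range_congr
  intro j hj
  rcases eq_or_ne j (m-t-2) with rfl | hj1
  · rw [if_pos rfl, if_pos (by omega : m-t-2 ≤ m-t-2 ∧ m-t-2 ≤ m+t+2)]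
  · rw [if_neg hj1]
    rcases eq_or_ne j (m+t+2) with rfl | hj2
    · rw [if_pos rfl, if_pos (by omega : m-t-2 ≤ m+t+2 ∧ m+t+2 ≤ m+t+2)]
    · rw [if_neg hj2]
      by_cases hc : m-t-1 ≤ j ∧ j ≤ m+t+1
      · rw [if_pos hc, if_pos (by omega : m-t-2 ≤ j ∧ j ≤ m+t+2)]
      · rw [if_neg hc, if_neg (by omega : ¬(m-t-2 ≤ j ∧ j ≤ m+t+2))]

lemma loopA (m : Nat) : ∀ (c t : Nat), t + c + 1 = m →
    (PySem.List.pyRange ((t : Nat) : Int) ((m : Int)-1) 1).foldl (stepA m)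
      (pvWin m (m-t-1) (m+t+1)) = pvWin m 0 (2*m) := by
  intro c
  induction c with
  | zero =>
    intro t ht
    rw [PySem.List.pyRange_one_eq_nil (by omega : ((m:Int)-1) ≤ (t:Int))]
    simp only [List.foldl_nil]
    have h1 : m - t - 1 = 0 := by omega
    have h2 : m + t + 1 = 2*m := by omega
    rw [h1, h2]
  | succ c ih =>
    intro t ht
    rw [PySem.List.pyRange_one_cons (by omega : (t:Int) < ((m:Int)-1))]
    simp only [List.foldl_cons]
    rw [stepA_win m t (by omega)]
    have e : (t:Int) + 1 = (((t+1 : Nat)) : Int) := by omega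
    have h2 : m - t - 2 = m - (t+1) - 1 := by omega
    have h3 : m + t + 2 = m + (t+1) + 1 := by omega
    rw [e, h2, h3, ih (t+1) (by omega)]

lemma init_win (m : Nat) (hm : 1 ≤ m) :
    PySem.List.pySetD (PySem.List.pySetD (PySem.List.pySetD
        ((List.range (2*m+1)).map (fun _ => (0:Int))) ((m:Int)) 0) ((m:Int)+1) 1) ((m:Int)-1) 1
      = pvWin m (m-1) (m+1) := by
  have e2 : (m:Int) + 1 = (((m+1 : Nat)) : Int) := by omega
  have e3 : (m:Int) - 1 = (((m-1 : Nat)) : Int) := by omega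
  rw [set_map_range _ m _ _ (by omega), e2, set_map_range _ _ _ _ (by omega),
      e3, set_map_range _ _ _ _ (by omega)]
  apply map_range_congr
  intro j hj
  have em : pvEnt m m = 0 := by
    have := ent_ge m 0; simpa using this
  have ep : pvEnt m (m+1) = 1 := by rw [ent_ge]; simp [pvF]
  have en : pvEnt m (m-1) = 1 := by
    rw [ent_lt m 1 le_rfl hm]; norm_num [pvF]
  rcases eq_or_ne j (m-1) with rfl | h1
  · rw [if_pos rfl, if_pos (by omega : m-1 ≤ m-1 ∧ m-1 ≤ m+1), en]
  · rw [if_neg h1]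
    rcases eq_or_ne j (m+1) with rfl | h2
    · rw [if_pos rfl, if_pos (by omega : m-1 ≤ m+1 ∧ m+1 ≤ m+1), ep]
    · rw [if_neg h2]
      rcases eq_or_ne j m with h3 | h3
      · rw [if_pos h3, if_pos (show m-1 ≤ j ∧ j ≤ m+1 by omega), h3, em]
      · rw [if_neg h3, if_neg (by omega : ¬(m-1 ≤ j ∧ j ≤ m+1))]

lemma portA_eq (m : Nat) (hm : 1 ≤ m) : fibonacci1 (m : Int) = pvWin m 0 (2*m) := by
  have hne : ¬ ((m:Int) = 0) := by omega
  have hrep : List.replicate ((2*(m:Int)+1).toNat) (0:Int)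
      = (List.range (2*m+1)).map (fun _ => (0:Int)) := by
    have hN : ((2*(m:Int)+1).toNat) = 2*m+1 := by omega
    rw [hN, List.map_const', List.length_range]
  simp only [fibonacci1, hne, if_false]
  rw [hrep, init_win m hm]
  have e0 : (0:Int) = (((0:Nat)) : Int) := rfl
  have h1 : m - 1 = m - 0 - 1 := by omega
  have h2 : m + 1 = m + 0 + 1 := by omega
  rw [e0, h1, h2, loopA m (m-1) 0 (by omega)]

-- B's build loop: state after consuming any list is the prefix of Fibonacci numbers plus the pair
lemma posLoop : ∀ (L : List Int) (t : Nat) (p : List Int),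
    L.foldl stepB (p, pvF t, pvF (t+1))
      = (p ++ (List.range L.length).map (fun i => pvF (t+i)), pvF (t+L.length), pvF (t+L.length+1)) := by
  intro L
  induction L with
  | nil => intro t p; simp
  | cons x L ih =>
    intro t p
    simp only [List.foldl_cons, stepB]
    have hf : pvF t + pvF (t+1) = pvF (t+2) := by simp [pvF]; ring
    rw [hf, ih (t+1) (p ++ [pvF t])]
    have hlist : (List.range (L.length+1)).map (fun i => pvF (t+i))
        = pvF t :: (List.range L.length).map (fun i => pvF (t+1+i)) := by
      rw [List.range_succ_eq_map, List.map_cons, List.map_map]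
      refine congrArg₂ _ (by simp) ?_
      exact List.map_congr_left (fun i _ => congrArg pvF (by omega))
    simp only [List.length_cons, hlist]
    refine congrArg₂ _ ?_ (congrArg₂ _ (congrArg pvF (by omega)) (congrArg pvF (by omega)))
    simp

lemma sign_eq (j : Nat) (hj : 1 ≤ j) (x : Int) :
    (if ¬ PySem.Int.mod ((j : Nat) : Int) 2 = 0 then x else -x) = (-1 : Int)^(j+1) * x := by
  rw [PySem.Int.mod_eq_emod_of_pos (by omega : (0:Int) < 2)]
  rcases Nat.even_or_odd j with he | ho
  · have h0 : ((j : Nat) : Int) % 2 = 0 := by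
      obtain ⟨r, rfl⟩ := he; push_cast; omega
    have : Odd (j+1) := Even.add_one he
    rw [if_neg (by simp [h0]), this.neg_one_pow]; ring
  · have h0 : ((j : Nat) : Int) % 2 = 1 := by
      obtain ⟨r, rfl⟩ := ho; push_cast; omega
    have : Even (j+1) := Odd.add_one ho
    rw [if_pos (by simp [h0]), this.neg_one_pow]; ring

lemma portB_eq (m : Nat) (hm : 1 ≤ m) : fibonacci1_alt (m : Int) = pvWin m 0 (2*m) := by
  have hlen : (PySem.List.pyRange 0 ((m:Int)+1) 1).length = m + 1 := by
    rw [PySem.List.length_pyRange_one]; omega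
  -- the positive list
  have hpos : ((PySem.List.pyRange 0 ((m:Int)+1) 1).foldl stepB ([], 0, 1)).1
      = (List.range (m+1)).map pvF := by
    rw [show (([], (0:Int), (1:Int)) : List Int × Int × Int)
          = ([], pvF 0, pvF (0+1)) from rfl]
    rw [posLoop, hlen]
    simp
  -- the countdown range
  have ht : (((m:Int)) - 0).toNat = m := by omega
  have hneg : PySem.List.pyRange ((m:Int)) 0 (-1)
      = (List.range m).map (fun k : Nat => ((m:Int)) - (k:Int)) := by
    rw [PySem.List.pyRange_neg_one, ht]
  simp only [fibonacci1_alt, hpos, hneg, List.map_map]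
  -- each negated entry is the right pvEnt
  have hnegmap : (List.range m).map ((fun k => if ¬ PySem.Int.mod k 2 = 0
          then PySem.List.pyGetD ((List.range (m+1)).map pvF) k 0
          else -(PySem.List.pyGetD ((List.range (m+1)).map pvF) k 0)) ∘ (fun k : Nat => ((m:Int)) - (k:Int)))
      = (List.range m).map (fun j => pvEnt m j) := by
    apply map_range_congr
    intro j hj
    have e : ((m:Int)) - ((j:Nat):Int) = (((m - j : Nat)) : Int) := by omega
    simp only [Function.comp, e]
    rw [get_map_range _ (m-j) _ (by omega), sign_eq (m-j) (by omega)]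
    simp [pvEnt, show ¬ m ≤ j from by omega]
  rw [hnegmap]
  -- assemble: window = negative half ++ positive half
  have hwin : pvWin m 0 (2*m) = (List.range (2*m+1)).map (fun j => pvEnt m j) := by
    apply map_range_congr
    intro j hj
    rw [if_pos (by omega : 0 ≤ j ∧ j ≤ 2*m)]
  have hsplit : (List.range (m+(m+1))).map (fun j => pvEnt m j)
      = (List.range m).map (fun j => pvEnt m j)
        ++ (List.range (m+1)).map (fun i => pvEnt m (m+i)) := by
    rw [List.range_add, List.map_append, List.map_map]
    rfl
  rw [hwin, show 2*m+1 = m+(m+1) from by omega, hsplit]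
  congr 1
  apply map_range_congr
  intro i hi
  exact (ent_ge m i).symm

-- ===== VERDICT (by name: the statement is the Claim_ definition above) =====
theorem fibonacci1_spec : Claim_equal_fibonacci1 := by
  intro n _ hP
  show fibonacci1 n = fibonacci1_alt n
  obtain ⟨m, rfl⟩ : ∃ m : Nat, n = (m : Int) := ⟨n.toNat, (Int.toNat_of_nonneg hP).symm⟩
  rcases Nat.eq_zero_or_pos m with hm | hm
  · subst hm; decide
  · rw [portA_eq m hm, portB_eq m hm]
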